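-- pv_equiv track=rewrite | github.com/KenMercusLai/checkio | Weak Point.py | weak_point
-- ===== SOURCE A (Python) =====
-- def weak_point(matrix):
--     rows = []
--     for i in matrix:
--         rows.append(sum(i))
--     _, idxRow = min((val, idx) for (idx, val) in enumerate(rows))
--     colMatrix = zip(*matrix[::-1])
--     cols = []
--     for i in colMatrix:
--         cols.append(sum(i))
--     _, idxCol = min((val, idx) for (idx, val) in enumerate(cols))
--     return [idxRow, idxCol]
-- ===== SOURCE B (Python) =====
-- def weak_point(matrix):
--     # One fused pass over the rows: keep a running (best row sum, its index) and an
--     # elementwise column-sum accumulator (zip truncates to the shortest row, like A's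
--     # transpose); then a second running-minimum scan picks the weakest column.
--     best_rv = best_r = col_acc = None
--     for i, row in enumerate(matrix):
--         s = sum(row)
--         if best_rv is None or s < best_rv:
--             best_rv, best_r = s, i
--         col_acc = list(row) if col_acc is None else [a + b for a, b in zip(col_acc, row)]
--     best_cv = best_c = None
--     for j, v in enumerate(col_acc):
--         if best_cv is None or v < best_cv:
--             best_cv, best_c = v, j
--     return [best_r, best_c]
-- ===== Notes on version B (the rewrite author's own statement) =====
-- stated objective: alternative
-- what changed: B replaces A's two staged passes (row-sum list + min over enumerate tuples, then a zip-transpose of the reversed matrix + a second min) by one fused pass over the rows that simultaneously maintains a running (best row sum, index) and an elementwise column-sum accumulator, followed by a single running-minimum scan for the column index; no transpose and no intermediate sum lists are built.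
import Mathlib
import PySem

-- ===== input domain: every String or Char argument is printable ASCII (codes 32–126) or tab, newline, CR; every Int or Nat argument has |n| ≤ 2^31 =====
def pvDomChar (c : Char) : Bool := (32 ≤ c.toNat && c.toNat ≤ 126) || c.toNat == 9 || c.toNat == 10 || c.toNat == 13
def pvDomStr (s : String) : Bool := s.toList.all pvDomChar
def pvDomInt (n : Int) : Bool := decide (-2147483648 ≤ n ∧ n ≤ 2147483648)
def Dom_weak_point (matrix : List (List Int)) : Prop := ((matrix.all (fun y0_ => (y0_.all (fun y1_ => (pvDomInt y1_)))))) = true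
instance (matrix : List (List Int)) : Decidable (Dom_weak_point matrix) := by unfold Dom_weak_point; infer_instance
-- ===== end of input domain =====

-- B fuses everything into one pass over the rows — a running (best row sum, index) plus an
-- elementwise column-sum accumulator — then one running-minimum scan for the column index;
-- no transpose and no intermediate sum lists (alternative decomposition, not faster).

-- ===== PORT A =====
-- Python's builtin min over (val, idx) tuples: running minimum, replaced exactly when the
-- candidate is lexicographically smaller; exact transcription of CPython's min loop.
def pvMinPairStep (m p : Int × Int) : Int × Int :=
  if p.1 < m.1 ∨ (p.1 = m.1 ∧ p.2 < m.2) then p else m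

def pvMinPair : List (Int × Int) → Option (Int × Int)
  | [] => none
  | x :: t => some (t.foldl pvMinPairStep x)

-- zip(*l): tuples of heads while every list is nonempty; the fuel (length of the first list)
-- bounds the number of steps, so this is exact.
def pvZip : Nat → List (List Int) → List (List Int)
  | 0, _ => []
  | fuel+1, l =>
    if l.isEmpty || l.any List.isEmpty then []
    else l.map (fun r => r.headD 0) :: pvZip fuel (l.map List.tail)

def weak_point (matrix : List (List Int)) : List Int :=
  let rows := matrix.foldl (fun acc i => acc ++ [i.sum]) []
  let idxRow := match pvMinPair ((PySem.List.enumerate rows).map (fun p => (p.2, p.1))) with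
    | some p => p.2
    | none => 0
  let rev := matrix.reverse          -- matrix[::-1]
  let colMatrix := pvZip (rev.headD []).length rev
  let cols := colMatrix.foldl (fun acc i => acc ++ [i.sum]) []
  let idxCol := match pvMinPair ((PySem.List.enumerate cols).map (fun p => (p.2, p.1))) with
    | some p => p.2
    | none => 0
  [idxRow, idxCol]

-- ===== PORT B =====
-- elementwise col_acc update: [a + b for a, b in zip(col_acc, row)] (zip truncates)
def pvAddTrunc (a b : List Int) : List Int := (a.zip b).map (fun p => p.1 + p.2)

-- the running-minimum update 'if best is None or v < best_val: …' (p = (index, value))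
def pvBestStep (st : Option (Int × Int)) (p : Int × Int) : Option (Int × Int) :=
  match st with
  | none => some (p.2, p.1)
  | some (bv, bi) => if p.2 < bv then some (p.2, p.1) else some (bv, bi)

-- 'col_acc = list(row) if col_acc is None else [a + b for a, b in zip(col_acc, row)]'
def pvAccStep (a : Option (List Int)) (row : List Int) : Option (List Int) :=
  match a with
  | none => some row
  | some x => some (pvAddTrunc x row)

def weak_point_alt (matrix : List (List Int)) : List Int :=
  let st := (PySem.List.enumerate matrix).foldl
    (fun (st : Option (Int × Int) × Option (List Int)) p =>
      (pvBestStep st.1 (p.1, p.2.sum), pvAccStep st.2 p.2))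
    (none, none)
  let bestR := match st.1 with | some p => p.2 | none => 0
  let colAcc := st.2.getD []
  let bestC := match (PySem.List.enumerate colAcc).foldl pvBestStep none with
    | some p => p.2
    | none => 0
  [bestR, bestC]

-- ===== PRECONDITION & SPEC =====
-- Pre_ excludes the empty matrix and matrices containing an empty row: there A raises
-- ValueError (min of an empty sequence), so A returns no value.
def Pre_weak_point (matrix : List (List Int)) : Prop :=
  matrix ≠ [] ∧ ∀ r ∈ matrix, r ≠ []
instance (matrix : List (List Int)) : Decidable (Pre_weak_point matrix) := by
  unfold Pre_weak_point; infer_instance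

def pvWitness_weak_point : List (List Int) := [[1, 2], [0, 3]]

def Spec_weak_point (matrix : List (List Int)) (out : List Int) : Prop := out = weak_point_alt matrix
instance (matrix : List (List Int)) (out : List Int) : Decidable (Spec_weak_point matrix out) := by unfold Spec_weak_point; infer_instance

-- ===== CLAIM (what is proved, stated in full; the proofs are below) =====
def Claim_equal_weak_point : Prop := ∀ (matrix : List (List Int)), Dom_weak_point matrix → Pre_weak_point matrix → Spec_weak_point matrix (weak_point matrix)

-- ===== LEMMAS AND PROOFS =====

-- canonical first-argmin both programs are reduced to
def pvIdxMin (xs : List Int) : Int :=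
  match PySem.List.min? xs (fun v => v) with
  | none => 0
  | some v => ((PySem.List.index? xs v).getD 0 : Nat)

-- pure running-minimum step once the state is some (m = (val, idx), p = (idx, val))
def pvPureStep (m : Int × Int) (p : Int × Int) : Int × Int :=
  if p.2 < m.1 then (p.2, p.1) else m

def pvMinLen (l : List (List Int)) : Nat := ((l.map List.length).min?).getD 0

-- the appending loop over rows/cols is a map
theorem foldl_append_map (f : List Int → Int) (l : List (List Int)) (acc : List Int) :
    l.foldl (fun a i => a ++ [f i]) acc = acc ++ l.map f := by
  induction l generalizing acc with
  | nil => simp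
  | cons x t ih => simp [List.foldl, ih, List.append_assoc]

theorem foldl_min_eq_self (t : List Int) (a : Int) (h : ∀ y ∈ t, a ≤ y) :
    t.foldl min a = a := by
  induction t generalizing a with
  | nil => rfl
  | cons x s ih =>
    have hx : a ≤ x := h x (by simp)
    simpa [List.foldl, min_eq_left hx] using ih a (fun y hy => h y (by simp [hy]))

theorem foldl_min_le' (t : List Int) (a : Int) : t.foldl min a ≤ a := by
  induction t generalizing a with
  | nil => simp
  | cons x s ih => exact le_trans (ih (min a x)) (min_le_left a x)

theorem foldl_min_le_mem (t : List Int) (a : Int) (y : Int) (hy : y ∈ t) :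
    t.foldl min a ≤ y := by
  induction t generalizing a with
  | nil => simp at hy
  | cons x s ih =>
    rcases List.mem_cons.mp hy with h | h
    · rw [h]; exact le_trans (foldl_min_le' s (min a x)) (min_le_right a x)
    · exact ih (min a x) h

theorem foldl_min_mem' (t : List Int) (a : Int) : t.foldl min a = a ∨ t.foldl min a ∈ t := by
  induction t generalizing a with
  | nil => left; rfl
  | cons x s ih =>
    have hfold : (x :: s).foldl min a = s.foldl min (min a x) := rfl
    rw [hfold]
    rcases ih (min a x) with h | h
    · rcases le_total a x with hax | hxa
      · left; rw [h, min_eq_left hax]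
      · right; rw [h, min_eq_right hxa]; exact List.mem_cons_self
    · right; exact List.mem_cons_of_mem _ h

-- the core argmin lemma for A's running-minimum fold over (val, idx) tuples
theorem foldl_minpair (xs : List Int) (s : Int) (m : Int × Int) (hm : m.2 < s) :
    ((PySem.List.enumerate xs s).map (fun p => (p.2, p.1))).foldl pvMinPairStep m =
      if ∃ x ∈ xs, x < m.1 then
        (xs.foldl min m.1, s + ((PySem.List.index? xs (xs.foldl min m.1)).getD 0 : Nat))
      else m := by
  induction xs generalizing s m with
  | nil => simp [PySem.List.enumerate_nil]
  | cons x t ih =>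
    rw [PySem.List.enumerate_cons]
    simp only [List.map_cons, List.foldl_cons]
    by_cases hx : x < m.1
    · have hstep : pvMinPairStep m (x, s) = (x, s) := by simp [pvMinPairStep, hx]
      rw [hstep, ih (s+1) (x, s) (by simp), min_eq_right (le_of_lt hx)]
      by_cases ht : ∃ y ∈ t, y < x
      · obtain ⟨y, hyt, hyx⟩ := ht
        have hvx : t.foldl min x < x := lt_of_le_of_lt (foldl_min_le_mem t x y hyt) hyx
        have hvt : t.foldl min x ∈ t := by
          rcases foldl_min_mem' t x with h | h
          · exfalso; omega
          · exact h
        obtain ⟨i, hi⟩ := Option.isSome_iff_exists.mp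
          ((PySem.List.index?_isSome_iff t (t.foldl min x)).mpr hvt)
        have hidx : PySem.List.index? (x :: t) (t.foldl min x) = some (i + 1) := by
          rw [PySem.List.index?_cons_of_ne t (fun h => by omega), hi]
          rfl
        rw [if_pos ⟨y, hyt, hyx⟩, if_pos ⟨x, List.mem_cons_self, hx⟩, hidx, hi]
        simp only [Option.getD_some, Prod.mk.injEq]
        exact ⟨trivial, by push_cast; ring⟩
      · have hvx : t.foldl min x = x :=
          foldl_min_eq_self t x (by
            intro y hy
            by_contra hc
            exact ht ⟨y, hy, lt_of_not_ge hc⟩)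
        rw [if_neg ht, if_pos ⟨x, List.mem_cons_self, hx⟩, hvx, PySem.List.index?_cons_self]
        simp
    · have hstep : pvMinPairStep m (x, s) = m := by
        simp only [pvMinPairStep]
        rw [if_neg]
        push_neg
        exact ⟨le_of_not_gt hx, fun _ => le_of_lt hm⟩
      have hmx : m.1 ≤ x := le_of_not_gt hx
      rw [hstep, ih (s+1) m (by omega), min_eq_left hmx]
      by_cases ht : ∃ y ∈ t, y < m.1
      · obtain ⟨y, hyt, hym⟩ := ht
        have hvm : t.foldl min m.1 < m.1 := lt_of_le_of_lt (foldl_min_le_mem t m.1 y hyt) hym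
        have hvt : t.foldl min m.1 ∈ t := by
          rcases foldl_min_mem' t m.1 with h | h
          · exfalso; omega
          · exact h
        obtain ⟨i, hi⟩ := Option.isSome_iff_exists.mp
          ((PySem.List.index?_isSome_iff t (t.foldl min m.1)).mpr hvt)
        have hvx : x ≠ t.foldl min m.1 := by intro h; rw [← h] at hvm; omega
        have hidx : PySem.List.index? (x :: t) (t.foldl min m.1) = some (i + 1) := by
          rw [PySem.List.index?_cons_of_ne t hvx, hi]; rfl
        rw [if_pos ⟨y, hyt, hym⟩, if_pos ⟨y, List.mem_cons_of_mem _ hyt, hym⟩, hidx, hi]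
        simp only [Option.getD_some, Prod.mk.injEq]
        exact ⟨trivial, by push_cast; ring⟩
      · have hcond : ¬ ∃ z ∈ x :: t, z < m.1 := by
          push_neg at ht ⊢
          intro z hz
          rcases List.mem_cons.mp hz with h | h
          · rw [h]; exact hmx
          · exact ht z h
        rw [if_neg ht, if_neg hcond]

-- the shared tail: extracting the index component of the running-minimum fold gives pvIdxMin
theorem argmin_core (x : Int) (t : List Int) :
    ((((PySem.List.enumerate t 1).map (fun p => (p.2, p.1))).foldl pvMinPairStep (x, 0)).2 : Int)
      = pvIdxMin (x :: t) := by
  rw [foldl_minpair t 1 (x, 0) (by norm_num)]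
  simp only [pvIdxMin, PySem.List.min?_id_cons]
  by_cases ht : ∃ y ∈ t, y < x
  · obtain ⟨y, hyt, hyx⟩ := ht
    have hvx : t.foldl min x < x := lt_of_le_of_lt (foldl_min_le_mem t x y hyt) hyx
    have hvt : t.foldl min x ∈ t := by
      rcases foldl_min_mem' t x with h' | h'
      · exfalso; omega
      · exact h'
    obtain ⟨i, hi⟩ := Option.isSome_iff_exists.mp
      ((PySem.List.index?_isSome_iff t (t.foldl min x)).mpr hvt)
    have hidx : PySem.List.index? (x :: t) (t.foldl min x) = some (i + 1) := by
      rw [PySem.List.index?_cons_of_ne t (fun h' => by omega), hi]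
      rfl
    rw [if_pos ⟨y, hyt, hyx⟩, hidx, hi]
    simp only [Option.getD_some]
    push_cast; ring
  · have hvx : t.foldl min x = x :=
      foldl_min_eq_self t x (by
        intro y hy
        by_contra hc
        exact ht ⟨y, hy, lt_of_not_ge hc⟩)
    rw [if_neg ht, hvx, PySem.List.index?_cons_self]
    simp

-- A's min-over-enumerate extraction equals pvIdxMin
theorem minpair_eq_idxmin (xs : List Int) (h : xs ≠ []) :
    (match pvMinPair ((PySem.List.enumerate xs).map (fun p => (p.2, p.1))) with
      | some p => p.2
      | none => 0) = pvIdxMin xs := by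
  obtain ⟨x, t, rfl⟩ := List.exists_cons_of_ne_nil h
  rw [show PySem.List.enumerate (x :: t) = (0, x) :: PySem.List.enumerate t 1 from
    PySem.List.enumerate_cons x t 0]
  simp only [List.map_cons, pvMinPair]
  exact argmin_core x t

-- minimum row length: characterisation and congruence lemmas
theorem pvMinLen_spec (l : List (List Int)) (h : l ≠ []) :
    pvMinLen l ∈ l.map List.length ∧ ∀ b ∈ l.map List.length, pvMinLen l ≤ b := by
  have hne : l.map List.length ≠ [] := by simpa using h
  obtain ⟨k, hk⟩ : ∃ k, (l.map List.length).min? = some k := by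
    cases hmin : (l.map List.length).min? with
    | none => exact absurd (List.min?_eq_none_iff.mp hmin) hne
    | some k => exact ⟨k, rfl⟩
  have := List.min?_eq_some_iff.mp hk
  simpa [pvMinLen, hk] using this

theorem pvMinLen_eq_of (l : List (List Int)) (h : l ≠ []) (k : Nat)
    (hmem : k ∈ l.map List.length) (hlb : ∀ b ∈ l.map List.length, k ≤ b) :
    pvMinLen l = k := by
  obtain ⟨hm, hb⟩ := pvMinLen_spec l h
  exact le_antisymm (hb k hmem) (hlb _ hm)

theorem pvMinLen_reverse (l : List (List Int)) (h : l ≠ []) :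
    pvMinLen l.reverse = pvMinLen l := by
  obtain ⟨hm, hb⟩ := pvMinLen_spec l h
  exact pvMinLen_eq_of l.reverse (by simpa using h) (pvMinLen l)
    (by simpa using hm) (by intro b hb'; exact hb b (by simpa using hb'))

theorem pvMinLen_tail (l : List (List Int)) (h : l ≠ []) (k : Nat)
    (hk : pvMinLen l = k + 1) : pvMinLen (l.map List.tail) = k := by
  obtain ⟨hm, hb⟩ := pvMinLen_spec l h
  rw [hk] at hm hb
  obtain ⟨r, hr, hrk⟩ := List.mem_map.mp hm
  refine pvMinLen_eq_of _ (by simpa using h) k ?_ ?_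
  · refine List.mem_map.mpr ⟨r.tail, List.mem_map.mpr ⟨r, hr, rfl⟩, ?_⟩
    rw [List.length_tail, hrk]
    omega
  · intro b hb'
    obtain ⟨rt, hrt, hrtb⟩ := List.mem_map.mp hb'
    obtain ⟨r', hr', rfl⟩ := List.mem_map.mp hrt
    have := hb r'.length (List.mem_map.mpr ⟨r', hr', rfl⟩)
    rw [← hrtb, List.length_tail]
    omega

theorem tail_getD (r : List Int) (j : Nat) : (List.tail r).getD j 0 = r.getD (j+1) 0 := by
  cases r <;> simp

theorem headD_getD (r : List Int) : r.headD 0 = r.getD 0 0 := by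
  cases r <;> simp

-- characterisation of A's hand-rolled zip(*l)
theorem pvZip_eq (fuel : Nat) (l : List (List Int)) (hl : l ≠ []) (hf : pvMinLen l ≤ fuel) :
    pvZip fuel l = (List.range (pvMinLen l)).map (fun j => l.map (fun r => r.getD j 0)) := by
  induction fuel generalizing l with
  | zero =>
    have : pvMinLen l = 0 := Nat.le_zero.mp hf
    simp [pvZip, this]
  | succ fuel ih =>
    cases hk : pvMinLen l with
    | zero =>
      obtain ⟨hm, _⟩ := pvMinLen_spec l hl
      rw [hk] at hm
      obtain ⟨r, hr, hr0⟩ := List.mem_map.mp hm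
      have hany : l.any List.isEmpty = true :=
        List.any_eq_true.mpr ⟨r, hr, by simp [List.isEmpty_iff, List.length_eq_zero_iff.mp hr0]⟩
      simp [pvZip, hany]
    | succ k =>
      obtain ⟨_, hb⟩ := pvMinLen_spec l hl
      rw [hk] at hb
      have hnoempty : l.any List.isEmpty = false := by
        rw [List.any_eq_false]
        intro r hr
        have := hb r.length (List.mem_map.mpr ⟨r, hr, rfl⟩)
        simp [List.isEmpty_iff]
        intro h0
        rw [h0] at this
        simp at this
      have hne : l.isEmpty = false := by simpa [List.isEmpty_iff] using hl
      rw [pvZip, if_neg (by simp [hne, hnoempty])]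
      have htail : pvMinLen (l.map List.tail) = k := pvMinLen_tail l hl k hk
      rw [ih (l.map List.tail) (by simpa using hl) (by omega), htail,
        List.range_succ_eq_map]
      simp only [List.map_cons, List.map_map]
      congr 1
      · exact List.map_congr_left (fun r _ => headD_getD r)
      · apply List.map_congr_left
        intro j _
        simp only [Function.comp_def, List.map_map]
        refine List.map_congr_left (fun r _ => ?_)
        simpa using tail_getD r j

-- ===== B-side lemmas =====

-- a foldl whose state components do not interact splits into two foldls
theorem fused_fold_split (l : List (Int × List Int))
    (a : Option (Int × Int)) (b : Option (List Int)) :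
    l.foldl (fun st p => (pvBestStep st.1 (p.1, p.2.sum), pvAccStep st.2 p.2)) (a, b) =
      (l.foldl (fun st p => pvBestStep st (p.1, p.2.sum)) a,
       l.foldl (fun a p => pvAccStep a p.2) b) := by
  induction l generalizing a b with
  | nil => rfl
  | cons x t ih => simpa using ih (pvBestStep a (x.1, x.2.sum)) (pvAccStep b x.2)

theorem bestStep_some (m p : Int × Int) :
    pvBestStep (some m) p = some (pvPureStep m p) := by
  rcases m with ⟨bv, bi⟩
  simp only [pvBestStep, pvPureStep]
  split_ifs <;> rfl

theorem foldl_bestStep_some (l : List (Int × Int)) (m : Int × Int) :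
    l.foldl pvBestStep (some m) = some (l.foldl pvPureStep m) := by
  induction l generalizing m with
  | nil => rfl
  | cons p t ih => simpa [bestStep_some] using ih (pvPureStep m p)

-- the B row loop on matrix rows equals the pure step loop on their sums
theorem foldl_bestStep_sum (l : List (List Int)) (s : Int)
    (b : Option (Int × Int)) :
    (PySem.List.enumerate l s).foldl (fun st p => pvBestStep st (p.1, p.2.sum)) b =
      (PySem.List.enumerate (l.map List.sum) s).foldl pvBestStep b := by
  induction l generalizing s b with
  | nil => simp [PySem.List.enumerate_nil]
  | cons r t ih =>
    rw [List.map_cons, PySem.List.enumerate_cons, PySem.List.enumerate_cons]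
    simpa using ih (s + 1) (pvBestStep b (s, r.sum))

-- B's running-minimum scan over enumerate equals pvMinPairStep's fold (and hence pvIdxMin)
theorem foldl_purestep (xs : List Int) (s : Int) (m : Int × Int) (hm : m.2 < s) :
    (PySem.List.enumerate xs s).foldl pvPureStep m =
      ((PySem.List.enumerate xs s).map (fun p => (p.2, p.1))).foldl pvMinPairStep m := by
  induction xs generalizing s m with
  | nil => simp [PySem.List.enumerate_nil]
  | cons x t ih =>
    rw [PySem.List.enumerate_cons]
    simp only [List.map_cons, List.foldl_cons]
    by_cases hx : x < m.1
    · have h1 : pvPureStep m (s, x) = (x, s) := by simp [pvPureStep, hx]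
      have h2 : pvMinPairStep m (x, s) = (x, s) := by simp [pvMinPairStep, hx]
      rw [h1, h2, ih (s+1) (x, s) (by simp)]
    · have h1 : pvPureStep m (s, x) = m := by simp [pvPureStep, hx]
      have h2 : pvMinPairStep m (x, s) = m := by
        simp only [pvMinPairStep]
        rw [if_neg]
        rintro (h | ⟨h, h2⟩)
        · exact hx h
        · omega
      rw [h1, h2, ih (s+1) m (by omega)]

theorem bfold_eq_idxmin (xs : List Int) (h : xs ≠ []) :
    (match (PySem.List.enumerate xs).foldl pvBestStep none with
      | some p => p.2
      | none => 0) = pvIdxMin xs := by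
  obtain ⟨x, t, rfl⟩ := List.exists_cons_of_ne_nil h
  rw [show PySem.List.enumerate (x :: t) = (0, x) :: PySem.List.enumerate t 1 from
    PySem.List.enumerate_cons x t 0]
  simp only [List.foldl_cons]
  rw [show pvBestStep none (0, x) = some (x, 0) from rfl, foldl_bestStep_some,
    foldl_purestep t 1 (x, 0) (by norm_num)]
  exact argmin_core x t

-- the column accumulator loop is a plain foldl of pvAddTrunc over the tail
theorem foldl_accStep (rest : List (List Int)) (s : Int) (r : List Int) :
    (PySem.List.enumerate rest s).foldl (fun a p => pvAccStep a p.2) (some r) =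
      some (rest.foldl pvAddTrunc r) := by
  induction rest generalizing s r with
  | nil => simp [PySem.List.enumerate_nil]
  | cons b t ih =>
    rw [PySem.List.enumerate_cons]
    simpa [pvAccStep] using ih (s + 1) (pvAddTrunc r b)

theorem length_addTrunc (a b : List Int) :
    (pvAddTrunc a b).length = min a.length b.length := by
  simp [pvAddTrunc]

theorem getD_addTrunc (a b : List Int) (j : Nat) (hj : j < min a.length b.length) :
    (pvAddTrunc a b).getD j 0 = a.getD j 0 + b.getD j 0 := by
  have h1 : j < a.length := lt_of_lt_of_le hj (min_le_left _ _)
  have h2 : j < b.length := lt_of_lt_of_le hj (min_le_right _ _)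
  have h3 : j < (pvAddTrunc a b).length := by rw [length_addTrunc]; omega
  rw [List.getD_eq_getElem _ _ h3, List.getD_eq_getElem _ _ h1, List.getD_eq_getElem _ _ h2]
  simp [pvAddTrunc]

theorem range_map_getD (l : List Int) :
    (List.range l.length).map (fun j => l.getD j 0) = l := by
  apply List.ext_getElem
  · simp
  · intro j h1 h2
    simp only [List.getElem_map, List.getElem_range]
    rw [List.getD_eq_getElem l 0 h2]

theorem pvMinLen_single (r : List Int) : pvMinLen [r] = r.length := by
  simp [pvMinLen]

theorem pvMinLen_addTrunc_cons (r b : List Int) (rest : List (List Int)) :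
    pvMinLen (pvAddTrunc r b :: rest) = pvMinLen (r :: b :: rest) := by
  obtain ⟨hm, hb⟩ := pvMinLen_spec (r :: b :: rest) (by simp)
  refine pvMinLen_eq_of _ (by simp) _ ?_ ?_
  · have hr : pvMinLen (r :: b :: rest) ≤ r.length := hb _ (by simp)
    have hbb : pvMinLen (r :: b :: rest) ≤ b.length := hb _ (by simp)
    simp only [List.map_cons, List.mem_cons] at hm ⊢
    rcases hm with h | h | h
    · left; rw [length_addTrunc]; omega
    · left; rw [length_addTrunc]; omega
    · right; exact h
  · intro c hc
    simp only [List.map_cons, List.mem_cons] at hc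
    rcases hc with h | h
    · rw [h, length_addTrunc]
      exact le_min (hb _ (by simp)) (hb _ (by simp))
    · exact hb c (by simp [h])

theorem foldl_addTrunc_eq (rest : List (List Int)) (r : List Int) :
    rest.foldl pvAddTrunc r =
      (List.range (pvMinLen (r :: rest))).map
        (fun j => ((r :: rest).map (fun row => row.getD j 0)).sum) := by
  induction rest generalizing r with
  | nil =>
    rw [pvMinLen_single]
    simpa using (range_map_getD r).symm
  | cons b t ih =>
    rw [List.foldl_cons, ih (pvAddTrunc r b), pvMinLen_addTrunc_cons]
    apply List.map_congr_left
    intro j hj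
    have hjlt : j < pvMinLen (r :: b :: t) := List.mem_range.mp hj
    obtain ⟨-, hb⟩ := pvMinLen_spec (r :: b :: t) (by simp)
    have hr : pvMinLen (r :: b :: t) ≤ r.length := hb _ (by simp)
    have hbb : pvMinLen (r :: b :: t) ≤ b.length := hb _ (by simp)
    simp only [List.map_cons, List.sum_cons]
    rw [getD_addTrunc r b j (by omega)]
    ring

-- ===== VERDICT (by name: the statement is the Claim_ definition above) =====
theorem weak_point_spec : Claim_equal_weak_point := by
  intro matrix _ hpre
  obtain ⟨hne, hrows⟩ := hpre
  show weak_point matrix = weak_point_alt matrix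
  obtain ⟨r0, rest, rfl⟩ := List.exists_cons_of_ne_nil hne
  set matrix := r0 :: rest with hmat
  -- A's side: reduce to [pvIdxMin rowSums, pvIdxMin colSums]
  have hneM : matrix ≠ [] := by simp [hmat]
  simp only [weak_point, weak_point_alt]
  rw [foldl_append_map List.sum matrix [], List.nil_append]
  have hrev : matrix.reverse ≠ [] := by simpa using hneM
  have hfuel : pvMinLen matrix.reverse ≤ (matrix.reverse.headD []).length := by
    obtain ⟨r, rt, hrt⟩ := List.exists_cons_of_ne_nil hrev
    have hlen := (pvMinLen_spec matrix.reverse hrev).2 r.length (by rw [hrt]; simp)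
    rw [hrt] at hlen ⊢
    simpa using hlen
  rw [pvZip_eq _ _ hrev hfuel, pvMinLen_reverse matrix hneM,
    foldl_append_map List.sum _ [], List.nil_append, List.map_map]
  have hcols : ((List.range (pvMinLen matrix)).map
      ((fun i => List.sum i) ∘ fun j => matrix.reverse.map fun r => r.getD j 0)) =
      (List.range (pvMinLen matrix)).map (fun j => (matrix.map (fun r => r.getD j 0)).sum) := by
    apply List.map_congr_left
    intro j _
    simp only [Function.comp]
    rw [List.map_reverse, List.sum_reverse]
  rw [hcols]
  have hm1 : 1 ≤ pvMinLen matrix := by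
    obtain ⟨hm, _⟩ := pvMinLen_spec matrix hneM
    obtain ⟨r, hr, hrk⟩ := List.mem_map.mp hm
    have : r ≠ [] := hrows r hr
    rw [← hrk]
    exact Nat.one_le_iff_ne_zero.mpr (by simpa [List.length_eq_zero_iff] using this)
  have hrowsne : matrix.map List.sum ≠ [] := by simpa using hneM
  have hcolsne : (List.range (pvMinLen matrix)).map
      (fun j => (matrix.map (fun r => r.getD j 0)).sum) ≠ [] := by
    simp only [ne_eq, List.map_eq_nil_iff, List.range_eq_nil]
    omega
  rw [minpair_eq_idxmin _ hrowsne, minpair_eq_idxmin _ hcolsne]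
  -- B's side: split the fused fold and reduce each component
  rw [fused_fold_split (PySem.List.enumerate matrix) none none]
  rw [foldl_bestStep_sum matrix 0 none]
  -- the accumulator component
  have hacc : (PySem.List.enumerate matrix).foldl (fun a p => pvAccStep a p.2) none =
      some (rest.foldl pvAddTrunc r0) := by
    rw [hmat, show PySem.List.enumerate (r0 :: rest) = (0, r0) :: PySem.List.enumerate rest 1 from
      PySem.List.enumerate_cons r0 rest 0]
    simpa [pvAccStep] using foldl_accStep rest 1 r0
  rw [hacc]
  simp only [Option.getD_some]
  rw [foldl_addTrunc_eq rest r0, ← hmat]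
  rw [bfold_eq_idxmin _ hrowsne, bfold_eq_idxmin _ hcolsne]
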